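-- pv_equiv track=rewrite | github.com/Dinith-Thejana/Assignment_2A | Agents/dfs.py | dfs
-- ===== SOURCE A (Python) =====
-- def dfs(graph, origin, destinations):
--     stack = [(origin, [origin])]
--     visited = set()
--     nodes_created = 1
--     while stack:
--         current_node, path = stack.pop()
--         if current_node in destinations:
--             return (current_node, nodes_created, path)
--         if current_node not in visited:
--             visited.add(current_node)
--             # Extract neighbor nodes (ignore costs for DFS)
--             neighbors = [neighbor for neighbor, _ in graph.get(current_node, [])]
--             neighbors_sorted = sorted(neighbors)  # Sort ascending
--             for neighbor in reversed(neighbors_sorted):  # Maintain order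
--                 nodes_created += 1
--                 stack.append((neighbor, path + [neighbor]))
--     return (None, nodes_created, [])
-- ===== SOURCE B (Python) =====
-- def dfs(graph, origin, destinations):
--     # Lazy-expansion DFS: one frame per expanded node (its sorted children and a
--     # cursor), instead of A's stack of (node, path) pairs pushed per edge.
--     nodes_created = 1
--     visited = set()
--     frames = []                     # each frame: [kids, next_index, parent_path]
--     node, path = origin, [origin]
--     while True:
--         if node in destinations:
--             return (node, nodes_created, path)
--         if node not in visited:
--             visited.add(node)
--             kids = sorted(n for n, _ in graph.get(node, []))
--             nodes_created += len(kids)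
--             frames.append([kids, 0, path])
--         # advance to the next pending child, dropping finished frames
--         while frames and frames[-1][1] >= len(frames[-1][0]):
--             frames.pop()
--         if not frames:
--             return (None, nodes_created, [])
--         kids, i, ppath = frames[-1]
--         frames[-1][1] = i + 1
--         node, path = kids[i], ppath + [kids[i]]
-- ===== Notes on version B (the rewrite author's own statement) =====
-- stated objective: alternative
-- what changed: Replaces A's eager DFS stack holding one (node, path) pair per pushed edge with a lazy-expansion DFS that keeps one frame (sorted children + cursor) per expanded node and materialises each child's path only when it is visited.
import Mathlib
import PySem

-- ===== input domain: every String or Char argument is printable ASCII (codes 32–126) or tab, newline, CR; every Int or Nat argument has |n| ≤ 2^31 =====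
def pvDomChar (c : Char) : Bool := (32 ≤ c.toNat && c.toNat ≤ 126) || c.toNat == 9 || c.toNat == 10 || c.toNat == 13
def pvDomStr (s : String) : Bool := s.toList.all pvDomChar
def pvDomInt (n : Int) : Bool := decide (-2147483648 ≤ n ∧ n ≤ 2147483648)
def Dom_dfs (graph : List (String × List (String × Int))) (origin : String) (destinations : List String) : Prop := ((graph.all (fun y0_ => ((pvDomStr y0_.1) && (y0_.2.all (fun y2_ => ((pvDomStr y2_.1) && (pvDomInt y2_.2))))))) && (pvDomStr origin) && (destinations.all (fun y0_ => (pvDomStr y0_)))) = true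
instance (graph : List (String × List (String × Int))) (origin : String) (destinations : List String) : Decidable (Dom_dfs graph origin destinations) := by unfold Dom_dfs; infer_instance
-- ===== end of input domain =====

-- B replaces A's per-edge stack of (node, path) pairs by a lazy-expansion DFS with one
-- frame (sorted children + cursor) per expanded node; objective: alternative (same cost).
-- Both Lean loops carry a fuel argument purely as a totality guard (one unit per node
-- visit, i.e. per pop of A's stack); the equivalence is proved for every fuel value.

-- fuel: 1 + total number of adjacency entries (an upper bound on the number of stack pops)
def dfsFuel (graph : List (String × List (String × Int))) : Nat :=
  1 + (graph.map (fun p => p.2.length)).sum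

-- ===== PORT A =====
-- A's while loop over a stack of (node, path) pairs; the stack's top is the list head,
-- so Python's reversed-sorted appends become a foldl of conses over the reversed list.
def dfsLoop (graph : List (String × List (String × Int))) (destinations : List String) :
    Nat → List (String × List String) → PySem.Set String → Int →
    Option String × Int × List String
  | _, [], _, nc => (none, nc, [])
  | 0, _ :: _, _, nc => (none, nc, [])
  | f+1, (c, p) :: rest, vis, nc =>
    if destinations.contains c then (some c, nc, p)
    else if !(PySem.Set.contains vis c) then
      let neighbors := ((PySem.Dict.mk graph).getD c []).map Prod.fst
      let ks := PySem.List.sorted neighbors (fun x => x) false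
      let st := ks.reverse.foldl
        (fun (acc : Int × List (String × List String)) n => (acc.1 + 1, (n, p ++ [n]) :: acc.2))
        (nc, rest)
      dfsLoop graph destinations f st.2 (PySem.Set.add vis c) st.1
    else dfsLoop graph destinations f rest vis nc

def dfs (graph : List (String × List (String × Int))) (origin : String) (destinations : List String) : Option String × Int × List String :=
  dfsLoop graph destinations (dfsFuel graph) [(origin, [origin])] PySem.Set.empty 1

-- ===== PORT B =====
-- a frame is (sorted children, cursor, path of the expanded node)
def dfsNextVisit : List (List String × Nat × List String) →
    Option (String × List String × List (List String × Nat × List String))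
  | [] => none
  | (kids, i, pp) :: rest =>
    if h : i < kids.length then
      some (kids[i], pp ++ [kids[i]], (kids, i + 1, pp) :: rest)
    else dfsNextVisit rest

def dfsVisit (graph : List (String × List (String × Int))) (destinations : List String) :
    Nat → String → List String → List (List String × Nat × List String) →
    PySem.Set String → Int → Option String × Int × List String
  | 0, _, _, _, _, nc => (none, nc, [])
  | f+1, node, path, frames, vis, nc =>
    if destinations.contains node then (some node, nc, path)
    else
      let s :=
        if PySem.Set.contains vis node then (frames, vis, nc)
        else
          let kids := PySem.List.sorted
            (((PySem.Dict.mk graph).getD node []).map Prod.fst) (fun x => x) false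
          ((kids, 0, path) :: frames, PySem.Set.add vis node, nc + (kids.length : Int))
      match dfsNextVisit s.1 with
      | none => (none, s.2.2, [])
      | some (n', p', fs') => dfsVisit graph destinations f n' p' fs' s.2.1 s.2.2

def dfs_alt (graph : List (String × List (String × Int))) (origin : String) (destinations : List String) : Option String × Int × List String :=
  dfsVisit graph destinations (dfsFuel graph) origin [origin] [] PySem.Set.empty 1

-- ===== PRECONDITION & SPEC =====
def Spec_dfs (graph : List (String × List (String × Int))) (origin : String) (destinations : List String) (out : Option String × Int × List String) : Prop := out = dfs_alt graph origin destinations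
instance (graph : List (String × List (String × Int))) (origin : String) (destinations : List String) (out : Option String × Int × List String) : Decidable (Spec_dfs graph origin destinations out) := by unfold Spec_dfs; infer_instance

-- ===== CLAIM (what is proved, stated in full; the proofs are below) =====
def Claim_equal_dfs : Prop := ∀ (graph : List (String × List (String × Int))) (origin : String) (destinations : List String), Dom_dfs graph origin destinations → Spec_dfs graph origin destinations (dfs graph origin destinations)

-- ===== LEMMAS AND PROOFS =====

-- A's stack contents corresponding to B's frame stack: the not-yet-taken children of
-- each frame, paired with their paths, top frame first.
def flattenFrames : List (List String × Nat × List String) → List (String × List String)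
  | [] => []
  | (kids, i, pp) :: rest =>
    (kids.drop i).map (fun n => (n, pp ++ [n])) ++ flattenFrames rest

lemma foldl_push (l : List String) (p : List String) :
    ∀ (nc : Int) (acc : List (String × List String)),
    l.foldl (fun (a : Int × List (String × List String)) n => (a.1 + 1, (n, p ++ [n]) :: a.2))
        (nc, acc)
      = (nc + l.length, l.reverse.map (fun n => (n, p ++ [n])) ++ acc) := by
  induction l with
  | nil => intro nc acc; simp
  | cons a t ih =>
    intro nc acc
    simp only [List.foldl_cons, ih, List.reverse_cons, List.map_append, List.map_cons,
      List.map_nil, List.append_assoc, List.singleton_append, List.length_cons]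
    congr 1
    push_cast; ring

lemma loop_eq_visit (graph : List (String × List (String × Int))) (destinations : List String) :
    ∀ (f : Nat) (node : String) (path : List String)
      (frames : List (List String × Nat × List String)) (vis : PySem.Set String) (nc : Int),
      dfsLoop graph destinations f ((node, path) :: flattenFrames frames) vis nc
        = dfsVisit graph destinations f node path frames vis nc := by
  intro f
  induction f with
  | zero => intro node path frames vis nc; simp [dfsLoop, dfsVisit]
  | succ f ih =>
    have sub : ∀ (frames : List (List String × Nat × List String))
        (vis : PySem.Set String) (nc : Int),
        dfsLoop graph destinations f (flattenFrames frames) vis nc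
          = match dfsNextVisit frames with
            | none => ((none : Option String), nc, ([] : List String))
            | some (n', p', fs') => dfsVisit graph destinations f n' p' fs' vis nc := by
      intro frames
      induction frames with
      | nil =>
        intro vis nc
        simp [flattenFrames, dfsNextVisit]
        cases f <;> simp [dfsLoop]
      | cons fr rest ihf =>
        obtain ⟨kids, i, pp⟩ := fr
        intro vis nc
        by_cases h : i < kids.length
        · have hdrop : kids.drop i = kids[i] :: kids.drop (i + 1) :=
            List.drop_eq_getElem_cons h
          have := ih kids[i] (pp ++ [kids[i]]) ((kids, i + 1, pp) :: rest) vis nc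
          simp only [flattenFrames, hdrop, List.map_cons, List.cons_append] at this ⊢
          rw [this]
          simp [dfsNextVisit, h]
        · have hdrop : kids.drop i = [] := by
            rw [List.drop_eq_nil_iff]; omega
          simp only [flattenFrames, hdrop, List.map_nil, List.nil_append]
          rw [ihf vis nc]
          simp [dfsNextVisit, h]
    intro node path frames vis nc
    simp only [dfsLoop, dfsVisit]
    by_cases hd : destinations.contains node = true
    · rw [if_pos hd, if_pos hd]
    · rw [if_neg hd, if_neg hd]
      by_cases hv : PySem.Set.contains vis node = true
      · have hm : node ∈ vis := by simpa [pysem] using hv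
        rw [if_neg (by simp [pysem, hm]), if_pos hv]
        simpa using sub frames vis nc
      · have hvf : PySem.Set.contains vis node = false := by
          revert hv; cases PySem.Set.contains vis node <;> simp
        have hm : node ∉ vis := by simpa [pysem] using hvf
        rw [if_pos (by simp [pysem, hm]), if_neg (by simp [pysem, hm])]
        rw [foldl_push]
        simp only [List.reverse_reverse, List.length_reverse]
        have hfl : (PySem.List.sorted (((PySem.Dict.mk graph).getD node []).map Prod.fst)
              (fun x => x) false).map (fun n => (n, path ++ [n])) ++ flattenFrames frames
            = flattenFrames (((PySem.List.sorted (((PySem.Dict.mk graph).getD node []).map Prod.fst)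
                (fun x => x) false), 0, path) :: frames) := by
          simp [flattenFrames]
        rw [hfl, sub]

-- ===== VERDICT (by name: the statement is the Claim_ definition above) =====
theorem dfs_spec : Claim_equal_dfs := by
  intro graph origin destinations _
  show dfs graph origin destinations = dfs_alt graph origin destinations
  unfold dfs dfs_alt
  have := loop_eq_visit graph destinations (dfsFuel graph) origin [origin] [] PySem.Set.empty 1
  simpa [flattenFrames] using this
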